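-- pv_equiv track=rewrite | github.com/miiiingyuuu/Algorithm | 백준/Silver/1802. 종이 접기/종이 접기.py | solve
-- ===== SOURCE A (Python) =====
-- def solve(fold):
--     n = len(fold)
--
--     if n == 1:
--         return True
--
--     mid = n // 2
--     left_half = fold[:mid]
--     right_half = fold[mid+1:]
--
--     for i in range(len(left_half)):
--         if left_half[i] == right_half[len(right_half) - 1 - i]:
--             return False
--
--     return solve(left_half)
-- ===== SOURCE B (Python) =====
-- def solve(fold):
--     m = len(fold)
--     while m > 1:
--         half = m // 2
--         for i in range(half):
--             if fold[i] == fold[m - 1 - i]: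
--                 return False
--         m = half
--     return True
-- ===== Notes on version B (the rewrite author's own statement) =====
-- stated objective: simpler
-- what changed: Replaces A's recursion with slicing (new left/right substrings at every level) by a single while loop over a shrinking length m that indexes the original string in place, comparing fold[i] with fold[m-1-i]; no slices and no recursion.
-- outside the precondition, e.g. on solve('abcb'): A returns False, B returns True; on solve('ab'): A raises IndexError, B returns True; on solve(''): A raises RecursionError, B returns True
import Mathlib
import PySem

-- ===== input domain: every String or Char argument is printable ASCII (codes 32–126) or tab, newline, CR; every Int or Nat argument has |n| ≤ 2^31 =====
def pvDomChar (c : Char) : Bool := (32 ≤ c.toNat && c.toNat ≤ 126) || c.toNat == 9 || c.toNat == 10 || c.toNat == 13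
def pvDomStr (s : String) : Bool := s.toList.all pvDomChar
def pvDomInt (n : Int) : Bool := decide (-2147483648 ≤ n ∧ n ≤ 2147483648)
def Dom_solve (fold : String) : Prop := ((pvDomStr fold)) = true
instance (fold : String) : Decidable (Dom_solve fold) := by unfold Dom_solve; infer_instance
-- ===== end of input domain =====

-- B replaces A's recursion-with-slicing by one while loop over a shrinking length m that
-- indexes the original string in place of building left/right slices (objective: simpler).

-- ===== PORT A =====
-- the for loop 'for i in range(len(left)): if left[i] == right[len(right)-1-i]: return False'
-- (the right index is a Python Int index: negative values wrap; pyGet? none = IndexError,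
-- unreachable inside Pre_; the Option == is exact there since every pyGet? is some)
def solveLoopA (left right : List Char) : Bool :=
  (List.range left.length).any (fun i =>
    PySem.List.pyGet? left (i : Int) == PySem.List.pyGet? right ((right.length : Int) - 1 - (i : Int)))

-- fuel only makes the recursion total (A recurses on fold[:len//2]; inside Pre_ the fuel
-- length+1 is never exhausted)
def solveFuel : Nat → List Char → Bool
  | 0, _ => true
  | fuel + 1, s =>
    let n := s.length
    if n = 1 then true
    else
      let mid := n / 2
      let left := s.take mid
      let right := s.drop (mid + 1)
      if solveLoopA left right then false
      else solveFuel fuel left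

def solve (fold : String) : Bool := solveFuel (fold.toList.length + 1) fold.toList

-- ===== PORT B =====
-- the while loop 'while m > 1: … m = half'; fuel = m makes it a structural recursion
-- (half = m/2 < m, so fuel m is always enough); every index Source B uses is in range,
-- so getD with a dummy default is exact
def altLoop : Nat → List Char → Nat → Bool
  | 0, _, _ => true
  | fuel + 1, s, m =>
    if m ≤ 1 then true
    else
      let half := m / 2
      if (List.range half).any (fun i => s.getD i ' ' == s.getD (m - 1 - i) ' ') then false
      else altLoop fuel s half

def solve_alt (fold : String) : Bool := altLoop fold.toList.length fold.toList fold.toList.length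

-- ===== PRECONDITION & SPEC =====
-- Pre_ restricts to the natural domain of BOJ 1802 (fold sequences of a paper folded k≥1 times,
-- length 2^k − 1); outside it A's halving always reaches length 2 or 0, where A raises
-- (IndexError / RecursionError) unless a negative-index wraparound comparison happens to
-- return False first — an unspecified corner no caller relies on.
def Pre_solve (fold : String) : Prop :=
  1 ≤ fold.toList.length ∧ fold.toList.length + 1 = 2 ^ Nat.log2 (fold.toList.length + 1)
instance (fold : String) : Decidable (Pre_solve fold) := by unfold Pre_solve; infer_instance

def pvWitness_solve : String := "0010011"

def Spec_solve (fold : String) (out : Bool) : Prop := out = solve_alt fold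
instance (fold : String) (out : Bool) : Decidable (Spec_solve fold out) := by unfold Spec_solve; infer_instance

-- ===== CLAIM (what is proved, stated in full; the proofs are below) =====
def Claim_equal_solve : Prop := ∀ (fold : String), Dom_solve fold → Pre_solve fold → Spec_solve fold (solve fold)

-- ===== LEMMAS AND PROOFS =====

theorem any_congr_mem {α : Type} (l : List α) (f g : α → Bool)
    (h : ∀ a ∈ l, f a = g a) : l.any f = l.any g := by
  induction l with
  | nil => rfl
  | cons x xs ih =>
    simp only [List.any_cons]
    rw [h x (by simp), ih (fun a ha => h a (by simp [ha]))]

theorem get?_eq_some_getD (s : List Char) (i : Nat) (h : i < s.length) :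
    s[i]? = some (s.getD i ' ') := by
  simp [List.getD, List.getElem?_eq_getElem h]

-- altLoop only looks at the fuel pattern and m, so any fuel ≥ m gives the same answer
theorem altLoop_fuel (m : Nat) : ∀ (f1 f2 : Nat) (s : List Char), m ≤ f1 → m ≤ f2 →
    altLoop f1 s m = altLoop f2 s m := by
  induction m using Nat.strong_induction_on with
  | _ m ih =>
    intro f1 f2 s h1 h2
    by_cases hm : m ≤ 1
    · cases f1 <;> cases f2 <;> simp [altLoop, hm]
    · obtain ⟨g1, rfl⟩ : ∃ g, f1 = g + 1 := ⟨f1 - 1, by omega⟩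
      obtain ⟨g2, rfl⟩ : ∃ g, f2 = g + 1 := ⟨f2 - 1, by omega⟩
      simp only [altLoop, if_neg hm]
      rw [ih (m / 2) (by omega) g1 g2 s (by omega) (by omega)]

-- altLoop only looks at indices < m, so a prefix of length ≥ m gives the same answer
theorem altLoop_take (f : Nat) : ∀ (s : List Char) (m t : Nat), m ≤ t →
    altLoop f (s.take t) m = altLoop f s m := by
  induction f with
  | zero => intro s m t _; rfl
  | succ g ih =>
    intro s m t hmt
    by_cases hm : m ≤ 1
    · simp [altLoop, hm]
    · simp only [altLoop, if_neg hm]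
      have hget : ∀ i : Nat, i < m → (s.take t).getD i ' ' = s.getD i ' ' := by
        intro i hi
        simp [List.getD, Nat.lt_of_lt_of_le hi hmt]
      rw [any_congr_mem _ _ (fun i => s.getD i ' ' == s.getD (m - 1 - i) ' ')
        (by intro i hi
            have hi' : i < m / 2 := List.mem_range.mp hi
            rw [hget i (by omega), hget (m - 1 - i) (by omega)])]
      split
      · rfl
      · exact ih s (m / 2) t (by omega)

-- at an odd level with s.length = 2*mid+1, A's comparison left[i] == right[len(right)-1-i]
-- is exactly B's s[i] == s[len(s)-1-i]
theorem loop_eq (s : List Char) (mid : Nat) (hlen : s.length = 2 * mid + 1) :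
    solveLoopA (s.take mid) (s.drop (mid + 1))
      = (List.range mid).any (fun i => s.getD i ' ' == s.getD (s.length - 1 - i) ' ') := by
  have hltake : (s.take mid).length = mid := by simp [hlen]; omega
  have hrdrop : (s.drop (mid + 1)).length = mid := by simp [hlen]; omega
  unfold solveLoopA
  rw [hltake]
  apply any_congr_mem
  intro i hi
  have hi' : i < mid := List.mem_range.mp hi
  have h1 : PySem.List.pyGet? (s.take mid) (i : Int) = some (s.getD i ' ') := by
    rw [PySem.List.pyGet?_natCast, List.getElem?_take, if_pos hi',
      get?_eq_some_getD s i (by omega)]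
  have hidx : (((s.drop (mid + 1)).length : Int) - 1 - (i : Int))
      = ((mid - 1 - i : Nat) : Int) := by
    rw [hrdrop]; omega
  have h2 : PySem.List.pyGet? (s.drop (mid + 1)) (((s.drop (mid + 1)).length : Int) - 1 - (i : Int))
      = some (s.getD (s.length - 1 - i) ' ') := by
    rw [hidx, PySem.List.pyGet?_natCast, List.getElem?_drop]
    have harith : mid + 1 + (mid - 1 - i) = s.length - 1 - i := by omega
    rw [harith, get?_eq_some_getD s _ (by omega)]
  rw [h1, h2]
  simp

-- main invariant: on a string of length 2^k − 1, A's recursion equals B's loop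
theorem main_eq (k : Nat) : ∀ (s : List Char) (fa fb : Nat),
    s.length = 2 ^ k - 1 → 1 ≤ k → k ≤ fa → s.length ≤ fb →
    solveFuel fa s = altLoop fb s s.length := by
  induction k with
  | zero => intro _ _ _ _ h; omega
  | succ k ih =>
    intro s fa fb hlen _ hfa hfb
    by_cases hk : k = 0
    · -- length 1: both sides are immediately true
      subst hk
      have h1 : s.length = 1 := by simpa using hlen
      obtain ⟨g1, rfl⟩ : ∃ g, fa = g + 1 := ⟨fa - 1, by omega⟩
      obtain ⟨g2, rfl⟩ : ∃ g, fb = g + 1 := ⟨fb - 1, by omega⟩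
      simp [solveFuel, altLoop, h1]
    · -- length 2^(k+1) − 1 ≥ 3
      have hk1 : 1 ≤ k := by omega
      have hpow : 2 ≤ 2 ^ k := by
        have h := Nat.pow_le_pow_right (show 0 < 2 by norm_num) hk1
        simpa using h
      have hn : s.length = 2 * (2 ^ k - 1) + 1 := by
        rw [hlen, pow_succ]; omega
      have hmid : s.length / 2 = 2 ^ k - 1 := by omega
      have hne1 : ¬ s.length = 1 := by omega
      obtain ⟨g1, rfl⟩ : ∃ g, fa = g + 1 := ⟨fa - 1, by omega⟩
      obtain ⟨g2, rfl⟩ : ∃ g, fb = g + 1 := ⟨fb - 1, by omega⟩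
      have hm1 : ¬ s.length ≤ 1 := by omega
      simp only [solveFuel, altLoop, if_neg hne1, if_neg hm1]
      rw [hmid, loop_eq s (2 ^ k - 1) (by omega)]
      split
      · rfl
      · -- recurse: A on the prefix, B on the same string with the halved length
        have hlt : (s.take (2 ^ k - 1)).length = 2 ^ k - 1 := by simp [hn]; omega
        calc solveFuel g1 (s.take (2 ^ k - 1))
            = altLoop (2 ^ k - 1) (s.take (2 ^ k - 1)) (s.take (2 ^ k - 1)).length := by
              exact ih (s.take (2 ^ k - 1)) g1 (2 ^ k - 1) hlt hk1 (by omega) (by omega)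
          _ = altLoop (2 ^ k - 1) s (2 ^ k - 1) := by rw [hlt]; exact altLoop_take _ s _ _ le_rfl
          _ = altLoop g2 s (2 ^ k - 1) := altLoop_fuel _ _ _ s le_rfl (by omega)

-- ===== VERDICT (by name: the statement is the Claim_ definition above) =====
theorem solve_spec : Claim_equal_solve := by
  intro fold _ hpre
  obtain ⟨hn1, hpow⟩ := hpre
  unfold Spec_solve solve solve_alt
  set s := fold.toList with hs
  set k := Nat.log2 (s.length + 1) with hk
  have hk2 : 2 ≤ 2 ^ k := by omega
  have hk1 : 1 ≤ k := by
    by_contra h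
    have : k = 0 := by omega
    rw [this] at hk2; norm_num at hk2
  have hkle : k ≤ s.length + 1 := by
    have := Nat.lt_two_pow_self (n := k)
    omega
  exact main_eq k s (s.length + 1) s.length (by omega) hk1 hkle le_rfl
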